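-- pv_equiv track=rewrite | github.com/FaiXanAhm3D/Acronym-maker | Question Paper codes/PYQ - 2022 Q - 8.py | PushNV
-- ===== SOURCE A (Python) =====
-- def PushNV(N):
--     NoVowel=[]
--     vowel=['a','e','i','o','u']
--     for i in N:
--         count=0
--         for j in vowel:
--             if j in i.lower():
--                 count+=1
--             else:
--                 continue
--         if count==0:
--             NoVowel.append(i)
--         else:
--             continue
--     return NoVowel
-- ===== SOURCE B (Python) =====
-- def PushNV(N):
--     # Delete-and-compare: strip all vowels via a translation table; a string
--     # survives iff deletion changes nothing.
--     table = str.maketrans('', '', 'aeiouAEIOU')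
--     return [s for s in N if s.translate(table) == s]
-- ===== Notes on version B (the rewrite author's own statement) =====
-- stated objective: alternative
-- what changed: Replaces A's per-string counter accumulated from five substring scans over a lowercased copy by a delete-and-compare strategy: a translation table strips every vowel (both cases) in one pass and the string is kept iff the stripped string equals the original, with no lowercased copy, no counter and no per-vowel loop.
import Mathlib
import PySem

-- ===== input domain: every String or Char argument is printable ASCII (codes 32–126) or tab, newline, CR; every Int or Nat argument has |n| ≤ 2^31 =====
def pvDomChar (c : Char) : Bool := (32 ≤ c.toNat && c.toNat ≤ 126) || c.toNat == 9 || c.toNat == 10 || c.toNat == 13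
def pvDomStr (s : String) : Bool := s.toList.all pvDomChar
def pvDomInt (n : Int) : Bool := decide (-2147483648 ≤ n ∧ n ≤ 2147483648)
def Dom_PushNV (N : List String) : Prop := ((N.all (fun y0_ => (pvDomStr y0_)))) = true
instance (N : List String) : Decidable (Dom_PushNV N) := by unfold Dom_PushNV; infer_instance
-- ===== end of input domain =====

-- B uses delete-and-compare: a translation table strips every vowel (both cases) and a string is
-- kept iff stripping changes nothing, replacing A's counter built from five lowercased substring scans.

-- ===== PORT A =====
-- A: for each i, count how many of the five vowels occur as substrings of i.lower(); keep i iff count == 0.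
def PushNV (N : List String) : List String :=
  let vowel : List String := ["a", "e", "i", "o", "u"]
  N.foldl (fun NoVowel i =>
    let count : Int := vowel.foldl (fun count j =>
      if PySem.Str.isIn j (PySem.Str.lower i) then count + 1 else count) 0
    if count = 0 then NoVowel ++ [i] else NoVowel) []

-- ===== PORT B =====
-- s.translate(str.maketrans('', '', 'aeiouAEIOU')): delete every vowel character (exact: the table
-- maps each of these chars to None, i.e. the result keeps exactly the chars not in the table).
def pvStripVowels (cs : List Char) : List Char :=
  cs.filter (fun c => !("aeiouAEIOU".toList.contains c))

-- B: keep s iff deleting the vowels leaves s unchanged.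
def PushNV_alt (N : List String) : List String :=
  N.filter (fun s => String.ofList (pvStripVowels s.toList) == s)

-- ===== PRECONDITION & SPEC =====
def Spec_PushNV (N : List String) (out : List String) : Prop := out = PushNV_alt N
instance (N : List String) (out : List String) : Decidable (Spec_PushNV N out) := by unfold Spec_PushNV; infer_instance

-- ===== CLAIM (what is proved, stated in full; the proofs are below) =====
def Claim_equal_PushNV : Prop := ∀ (N : List String), Dom_PushNV N → Spec_PushNV N (PushNV N)

-- ===== LEMMAS AND PROOFS =====

theorem char_eq_iff_toNat (a b : Char) : a = b ↔ a.toNat = b.toNat :=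
  ⟨fun h => h ▸ rfl, fun h => Char.ext (UInt32.toNat_inj.mp h)⟩

theorem char_le_iff_toNat (a b : Char) : a ≤ b ↔ a.toNat ≤ b.toNat := by
  rw [Char.le_def, UInt32.le_iff_toNat_le]; rfl

-- lowercasing a character lands in the five lowercase vowels iff the character is a vowel of either case
theorem lc_mem (c : Char) : (PySem.Chars.lowerChar c ∈ (['a','e','i','o','u'] : List Char)) ↔ c ∈ (['a','e','i','o','u','A','E','I','O','U'] : List Char) := by
  have e1 : 'A'.toNat = 65 := rfl
  have e2 : 'Z'.toNat = 90 := rfl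
  have ea : 'a'.toNat = 97 := rfl
  have ee : 'e'.toNat = 101 := rfl
  have ei : 'i'.toNat = 105 := rfl
  have eo : 'o'.toNat = 111 := rfl
  have eu : 'u'.toNat = 117 := rfl
  have eE : 'E'.toNat = 69 := rfl
  have eI : 'I'.toNat = 73 := rfl
  have eO : 'O'.toNat = 79 := rfl
  have eU : 'U'.toNat = 85 := rfl
  simp only [PySem.Chars.lowerChar, PySem.Chars.isupper, List.mem_cons, List.not_mem_nil, or_false]
  split_ifs with h
  · simp only [Bool.and_eq_true, decide_eq_true_eq, char_le_iff_toNat, e1, e2] at h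
    have ht : (Char.ofNat (c.toNat + 32)).toNat = c.toNat + 32 := by
      rw [Char.toNat_ofNat, if_pos]
      exact Or.inl (by omega)
    simp only [char_eq_iff_toNat, ht, ea, ee, ei, eo, eu, e1, eE, eI, eO, eU]
    omega
  · simp only [Bool.and_eq_true, decide_eq_true_eq, char_le_iff_toNat, e1, e2, not_and, not_le] at h
    simp only [char_eq_iff_toNat, ea, ee, ei, eo, eu, e1, eE, eI, eO, eU]
    omega

theorem singleton_infix_iff (a : Char) (l : List Char) : [a] <:+: l ↔ a ∈ l := by
  constructor
  · rintro ⟨s, t, rfl⟩; simp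
  · intro h
    obtain ⟨s, t, rfl⟩ := List.append_of_mem h
    exact ⟨s, t, by simp⟩

-- single-character substring test on the lowercased string = membership test on the mapped character list
theorem isIn_lower_iff (v : Char) (s : String) :
    PySem.Str.isIn (String.ofList [v]) (PySem.Str.lower s) = true ↔ ∃ c ∈ s.toList, PySem.Chars.lowerChar c = v := by
  rw [PySem.Str.isIn_iff_infix]
  have hv : (String.ofList [v]).toList = [v] := by simp
  rw [hv, PySem.Str.toList_lower, singleton_infix_iff, PySem.Chars.lower, List.mem_map]

-- the single-vowel substring test fails exactly when no character lowercases to that vowel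
theorem isIn_lower_false_iff (v : Char) (s : String) :
    PySem.Str.isIn (String.ofList [v]) (PySem.Str.lower s) = false ↔
      ∀ c ∈ s.toList, PySem.Chars.lowerChar c ≠ v := by
  rw [← Bool.not_eq_true, isIn_lower_iff]
  push Not
  rfl

-- A's per-string test (vowel count over the five substring scans is zero) agrees with "no character is a vowel"
theorem a_per_string (i : String) :
    (decide ((["a", "e", "i", "o", "u"].foldl (fun count j =>
        if PySem.Str.isIn j (PySem.Str.lower i) then count + 1 else count) (0 : Int)) = 0))
    = i.toList.all (fun c => !((['a','e','i','o','u','A','E','I','O','U'] : List Char).contains c)) := by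
  have hcount : ((["a", "e", "i", "o", "u"].foldl (fun count j =>
        if PySem.Str.isIn j (PySem.Str.lower i) then count + 1 else count) (0 : Int)) = 0) ↔
      (PySem.Str.isIn "a" (PySem.Str.lower i) = false ∧ PySem.Str.isIn "e" (PySem.Str.lower i) = false ∧
       PySem.Str.isIn "i" (PySem.Str.lower i) = false ∧ PySem.Str.isIn "o" (PySem.Str.lower i) = false ∧
       PySem.Str.isIn "u" (PySem.Str.lower i) = false) := by
    rw [PySem.List.foldl_if_add_one, zero_add, Int.natCast_eq_zero, List.countP_eq_zero]
    simp [Bool.not_eq_true]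
  rw [Bool.eq_iff_iff, decide_eq_true_iff, List.all_eq_true, hcount]
  constructor
  · rintro ⟨h1, h2, h3, h4, h5⟩ c hc
    have hna := (isIn_lower_false_iff 'a' i).mp h1 c hc
    have hne := (isIn_lower_false_iff 'e' i).mp h2 c hc
    have hni := (isIn_lower_false_iff 'i' i).mp h3 c hc
    have hno := (isIn_lower_false_iff 'o' i).mp h4 c hc
    have hnu := (isIn_lower_false_iff 'u' i).mp h5 c hc
    have hmem : PySem.Chars.lowerChar c ∉ (['a','e','i','o','u'] : List Char) := by
      intro hm
      simp only [List.mem_cons, List.not_mem_nil, or_false] at hm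
      rcases hm with h | h | h | h | h
      exacts [hna h, hne h, hni h, hno h, hnu h]
    rw [lc_mem] at hmem
    rw [Bool.not_eq_true']
    by_contra hcon
    rw [Bool.not_eq_false] at hcon
    exact hmem (by simpa using hcon)
  · intro h
    have hfa : ∀ v : Char, v ∈ (['a','e','i','o','u'] : List Char) →
        ∀ c ∈ i.toList, PySem.Chars.lowerChar c ≠ v := by
      intro v hv c hc heq
      have hm : PySem.Chars.lowerChar c ∈ (['a','e','i','o','u'] : List Char) := heq ▸ hv
      rw [lc_mem] at hm
      have hb := h c hc
      rw [Bool.not_eq_true'] at hb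
      have : (['a','e','i','o','u','A','E','I','O','U'] : List Char).contains c = true := by
        simpa using hm
      rw [this] at hb
      exact Bool.noConfusion hb
    refine ⟨?_, ?_, ?_, ?_, ?_⟩
    · exact (isIn_lower_false_iff 'a' i).mpr (hfa 'a' (by simp))
    · exact (isIn_lower_false_iff 'e' i).mpr (hfa 'e' (by simp))
    · exact (isIn_lower_false_iff 'i' i).mpr (hfa 'i' (by simp))
    · exact (isIn_lower_false_iff 'o' i).mpr (hfa 'o' (by simp))
    · exact (isIn_lower_false_iff 'u' i).mpr (hfa 'u' (by simp))

-- B's per-string test (stripping the vowels leaves s unchanged) agrees with "no character is a vowel"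
theorem b_per_string (s : String) :
    (String.ofList (pvStripVowels s.toList) == s)
    = s.toList.all (fun c => !((['a','e','i','o','u','A','E','I','O','U'] : List Char).contains c)) := by
  have hvl : ("aeiouAEIOU".toList) = (['a','e','i','o','u','A','E','I','O','U'] : List Char) := rfl
  rw [Bool.eq_iff_iff, beq_iff_eq]
  constructor
  · intro h
    have hl : pvStripVowels s.toList = s.toList := by
      have := congrArg String.toList h
      simpa using this
    rw [pvStripVowels, hvl] at hl
    exact List.all_eq_true.mpr (List.filter_eq_self.mp hl)
  · intro h
    have hl : pvStripVowels s.toList = s.toList := by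
      rw [pvStripVowels, hvl]
      exact List.filter_eq_self.mpr (by simpa [List.all_eq_true] using h)
    rw [hl]
    simp

-- ===== VERDICT (by name: the statement is the Claim_ definition above) =====
theorem PushNV_spec : Claim_equal_PushNV := by
  intro N _
  show PushNV N = PushNV_alt N
  show N.foldl (fun NoVowel i =>
      if (["a", "e", "i", "o", "u"].foldl (fun count j =>
        if PySem.Str.isIn j (PySem.Str.lower i) then count + 1 else count) (0 : Int)) = 0
      then NoVowel ++ [i] else NoVowel) []
    = PushNV_alt N
  rw [PySem.List.foldl_append_ite_eq_filter, List.nil_append]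
  exact List.filter_congr (fun i _ => (a_per_string i).trans (b_per_string i).symm)
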